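-- pv_equiv track=rewrite | github.com/acmeism/RosettaCodeData | Task/Zig-zag-matrix/Python/zig-zag-matrix-1.py | zigzag
-- ===== SOURCE A (Python) =====
-- def zigzag(n):
--     '''zigzag rows'''
--     def compare(xy):
--         x, y = xy
--         return (x + y, -y if (x + y) % 2 else y)
--     xs = range(n)
--     return {index: n for n, index in enumerate(sorted(
--         ((x, y) for x in xs for y in xs),
--         key=compare
--     ))}
-- ===== SOURCE B (Python) =====
-- def zigzag(n):
--     result = {}
--     rank = 0
--     for d in range(2 * n - 1):
--         lo = max(0, d - n + 1)
--         hi = min(d, n - 1)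
--         ys = range(lo, hi + 1) if d % 2 == 0 else range(hi, lo - 1, -1)
--         for y in ys:
--             result[(d - y, y)] = rank
--             rank += 1
--     return result
-- ===== Notes on version B (the rewrite author's own statement) =====
-- stated objective: faster
-- what changed: Instead of generating all n^2 coordinate pairs and sorting them by a (diagonal, direction) tuple key, B walks the anti-diagonals d = x + y in order, alternating traversal direction, and assigns sequential ranks directly.
import Mathlib
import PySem

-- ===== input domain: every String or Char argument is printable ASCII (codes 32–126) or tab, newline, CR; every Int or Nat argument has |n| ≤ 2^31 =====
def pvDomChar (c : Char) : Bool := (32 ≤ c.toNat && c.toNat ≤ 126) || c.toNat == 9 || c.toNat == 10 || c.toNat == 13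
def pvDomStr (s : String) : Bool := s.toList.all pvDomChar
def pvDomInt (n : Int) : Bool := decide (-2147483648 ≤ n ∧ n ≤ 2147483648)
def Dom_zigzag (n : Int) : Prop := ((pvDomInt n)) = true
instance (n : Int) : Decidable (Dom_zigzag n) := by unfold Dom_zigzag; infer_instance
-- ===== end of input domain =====

-- B replaces A's sort of all n² coordinates under a (diagonal, direction) tuple key by a direct
-- walk of the anti-diagonals that assigns sequential ranks (objective: faster).

-- ===== PORT A =====
-- A's key function compare(xy) = (x + y, -y if (x + y) % 2 else y)
def zigzagK1 (xy : Int × Int) : Int := xy.1 + xy.2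
def zigzagK2 (xy : Int × Int) : Int :=
  if PySem.Int.mod (xy.1 + xy.2) 2 ≠ 0 then -xy.2 else xy.2

def zigzag (n : Int) : List (Int × Int × Int) :=
  let xs := PySem.List.pyRange 0 n 1
  let pairs := xs.flatMap (fun x => xs.map (fun y => (x, y)))
  let s := PySem.List.sorted2 pairs zigzagK1 zigzagK2
  -- dict comprehension {pair: rank for rank, pair in enumerate(s)}, rendered as triples (x, y, rank)
  (((PySem.List.enumerate s).foldl (fun d p => d.insert p.2 p.1)
      (PySem.Dict.empty : PySem.Dict (Int × Int) Int)).items).map (fun p => (p.1.1, p.1.2, p.2))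

-- ===== PORT B =====
def zigzag_alt (n : Int) : List (Int × Int × Int) :=
  ((PySem.List.pyRange 0 (2 * n - 1) 1).foldl (fun st d =>
      let lo := max 0 (d - n + 1)
      let hi := min d (n - 1)
      let ys := if PySem.Int.mod d 2 = 0 then PySem.List.pyRange lo (hi + 1) 1
                else PySem.List.pyRange hi (lo - 1) (-1)
      ys.foldl (fun st y => (st.1 ++ [(d - y, y, st.2)], st.2 + 1)) st)
    (([] : List (Int × Int × Int)), (0 : Int))).1

-- ===== PRECONDITION & SPEC =====
def Spec_zigzag (n : Int) (out : List (Int × Int × Int)) : Prop := out = zigzag_alt n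
instance (n : Int) (out : List (Int × Int × Int)) : Decidable (Spec_zigzag n out) := by unfold Spec_zigzag; infer_instance

-- ===== CLAIM (what is proved, stated in full; the proofs are below) =====
def Claim_equal_zigzag : Prop := ∀ (n : Int), Dom_zigzag n → Spec_zigzag n (zigzag n)

-- ===== LEMMAS AND PROOFS =====

-- the list of y-coordinates B visits on anti-diagonal d
def zzYs (n d : Int) : List Int :=
  if PySem.Int.mod d 2 = 0 then
    PySem.List.pyRange (max 0 (d - n + 1)) (min d (n - 1) + 1) 1
  else
    PySem.List.pyRange (min d (n - 1)) (max 0 (d - n + 1) - 1) (-1)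

-- the cells in B's visiting order
def zzCells (n : Int) : List (Int × Int) :=
  (PySem.List.pyRange 0 (2 * n - 1) 1).flatMap (fun d => (zzYs n d).map (fun y => (d - y, y)))

-- the grid in A's generation order
def zzPairs (n : Int) : List (Int × Int) :=
  (PySem.List.pyRange 0 n 1).flatMap (fun x => (PySem.List.pyRange 0 n 1).map (fun y => (x, y)))

-- A's tuple key, as a lexicographic value
def zzKey (c : Int × Int) : Lex (Int × Int) := toLex (zigzagK1 c, zigzagK2 c)

def zzTriple (p : Int × (Int × Int)) : Int × Int × Int := (p.2.1, p.2.2, p.1)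

theorem zz_rank_fold (L : List (Int × Int)) (acc : List (Int × Int × Int)) (r : Int) :
    L.foldl (fun st c => (st.1 ++ [(c.1, c.2, st.2)], st.2 + 1)) (acc, r)
      = (acc ++ (PySem.List.enumerate L r).map zzTriple, r + L.length) := by
  induction L generalizing acc r with
  | nil => simp [PySem.List.enumerate]
  | cons c L ih =>
    simp only [List.foldl_cons, PySem.List.enumerate_cons, List.map_cons, ih]
    simp [zzTriple, List.append_assoc]; omega

theorem zz_alt_shape (n : Int) :
    zigzag_alt n = (PySem.List.enumerate (zzCells n)).map zzTriple := by
  unfold zigzag_alt zzCells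
  have hfun : (fun (st : List (Int × Int × Int) × Int) (d : Int) =>
      let lo := max 0 (d - n + 1)
      let hi := min d (n - 1)
      let ys := if PySem.Int.mod d 2 = 0 then PySem.List.pyRange lo (hi + 1) 1
                else PySem.List.pyRange hi (lo - 1) (-1)
      ys.foldl (fun st y => (st.1 ++ [(d - y, y, st.2)], st.2 + 1)) st)
      = (fun st d => (((zzYs n d).map (fun y => (d - y, y))).foldl
          (fun st c => (st.1 ++ [(c.1, c.2, st.2)], st.2 + 1)) st)) := by
    funext st d
    simp only [zzYs, List.foldl_map]
  rw [hfun, ← List.foldl_flatMap, zz_rank_fold]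
  simp

theorem zz_nodup_pairs (n : Int) : (zzPairs n).Nodup := by
  have h : zzPairs n = (PySem.List.pyRange 0 n 1) ×ˢ (PySem.List.pyRange 0 n 1) := rfl
  rw [h]
  exact List.Nodup.product (PySem.List.nodup_pyRange_one 0 n) (PySem.List.nodup_pyRange_one 0 n)

theorem zz_a_shape (n : Int) :
    zigzag n
      = (PySem.List.enumerate (PySem.List.sorted2 (zzPairs n) zigzagK1 zigzagK2)).map zzTriple := by
  have hnd : (PySem.List.sorted2 (zzPairs n) zigzagK1 zigzagK2).Nodup :=
    ((PySem.List.sorted2_perm (zzPairs n) zigzagK1 zigzagK2 false).nodup_iff).mpr (zz_nodup_pairs n)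
  show (((PySem.List.enumerate (PySem.List.sorted2 (zzPairs n) zigzagK1 zigzagK2)).foldl
      (fun d p => d.insert p.2 p.1)
      (PySem.Dict.empty : PySem.Dict (Int × Int) Int)).items).map (fun p => (p.1.1, p.1.2, p.2)) = _
  rw [show (List.foldl (fun d p => d.insert p.2 p.1)
        (PySem.Dict.empty : PySem.Dict (Int × Int) Int)
        (PySem.List.enumerate (PySem.List.sorted2 (zzPairs n) zigzagK1 zigzagK2))).items
      = [] ++ (PySem.List.enumerate (PySem.List.sorted2 (zzPairs n) zigzagK1 zigzagK2)).map
          (fun a => (a.2, a.1)) from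
    PySem.Dict.items_foldl_insert_fresh
      (PySem.List.enumerate (PySem.List.sorted2 (zzPairs n) zigzagK1 zigzagK2))
      (fun (p : Int × (Int × Int)) => p.2) (fun (p : Int × (Int × Int)) => p.1) PySem.Dict.empty
      (by intro a _; exact PySem.Dict.contains_empty _)
      (by rw [PySem.List.map_snd_enumerate]; exact hnd)]
  simp [zzTriple, Function.comp]

theorem zz_sorted2_eq_sorted_lex (xs : List (Int × Int)) :
    PySem.List.sorted2 xs zigzagK1 zigzagK2 = PySem.List.sorted xs zzKey := by
  have hb : ∀ (a b : Int × Int),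
      (decide (zigzagK1 a < zigzagK1 b) || (!decide (zigzagK1 b < zigzagK1 a) && decide (zigzagK2 a < zigzagK2 b)))
        = decide (zzKey a < zzKey b) := by
    intro a b
    have hlex : (zzKey a < zzKey b)
        ↔ (zigzagK1 a < zigzagK1 b ∨ zigzagK1 a = zigzagK1 b ∧ zigzagK2 a < zigzagK2 b) :=
      Prod.Lex.toLex_lt_toLex
    by_cases h1 : zigzagK1 a < zigzagK1 b <;> by_cases h2 : zigzagK1 b < zigzagK1 a <;>
      by_cases h3 : zigzagK2 a < zigzagK2 b <;> simp [h1, h2, h3, hlex] <;> omega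
  simp only [PySem.List.sorted2, PySem.List.sorted, hb]

theorem zz_mem_ys (n d y : Int) :
    y ∈ zzYs n d ↔ max 0 (d - n + 1) ≤ y ∧ y ≤ min d (n - 1) := by
  unfold zzYs
  split
  · rw [PySem.List.mem_pyRange_one]; omega
  · rw [PySem.List.mem_pyRange_neg_one]; omega

theorem zz_mem_cells (n : Int) (p : Int × Int) :
    p ∈ zzCells n ↔ 0 ≤ p.1 ∧ p.1 < n ∧ 0 ≤ p.2 ∧ p.2 < n := by
  obtain ⟨x, y⟩ := p
  simp only [zzCells, List.mem_flatMap, List.mem_map, PySem.List.mem_pyRange_one, zz_mem_ys,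
    Prod.mk.injEq]
  constructor
  · rintro ⟨d, ⟨hd0, hd1⟩, y', ⟨h1, h2⟩, rfl, rfl⟩
    omega
  · rintro ⟨hx0, hx1, hy0, hy1⟩
    exact ⟨x + y, by omega, y, by omega, by omega, rfl⟩

theorem zz_mem_pairs (n : Int) (p : Int × Int) :
    p ∈ zzPairs n ↔ 0 ≤ p.1 ∧ p.1 < n ∧ 0 ≤ p.2 ∧ p.2 < n := by
  obtain ⟨x, y⟩ := p
  simp only [zzPairs, List.mem_flatMap, List.mem_map, PySem.List.mem_pyRange_one, Prod.mk.injEq]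
  constructor
  · rintro ⟨x', ⟨h1, h2⟩, y', ⟨h3, h4⟩, rfl, rfl⟩; exact ⟨h1, h2, h3, h4⟩
  · rintro ⟨hx0, hx1, hy0, hy1⟩; exact ⟨x, ⟨hx0, hx1⟩, y, ⟨hy0, hy1⟩, rfl, rfl⟩

theorem zz_pairwise_cells (n : Int) :
    (zzCells n).Pairwise (fun a b => zzKey a < zzKey b) := by
  unfold zzCells
  rw [List.flatMap_def, List.pairwise_flatten]
  constructor
  · intro l hl
    simp only [List.mem_map] at hl
    obtain ⟨d, hd, rfl⟩ := hl
    rw [PySem.List.mem_pyRange_one] at hd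
    have hm : PySem.Int.mod d 2 = d % 2 := PySem.Int.mod_eq_emod_of_pos (by norm_num)
    rw [List.pairwise_map]
    have hkey : ∀ y ∈ zzYs n d, zzKey (d - y, y) = toLex (d, if d % 2 ≠ 0 then -y else y) := by
      intro y _
      simp only [zzKey, zigzagK1, zigzagK2]
      have : d - y + y = d := by ring
      rw [this, PySem.Int.mod_eq_emod_of_pos (by norm_num)]
    apply List.Pairwise.imp_of_mem
      (R := fun y y' => zzKey (d - y, y) < zzKey (d - y', y'))
    · intro a b ha hb h; exact h
    · -- pairwise on zzYs
      have hy : (zzYs n d).Pairwise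
          (fun y y' => zzKey (d - y, y) < zzKey (d - y', y')) := by
        have base : (zzYs n d).Pairwise (fun y y' =>
            (if d % 2 ≠ 0 then -y else y) < (if d % 2 ≠ 0 then -y' else y')) := by
          unfold zzYs
          rw [hm]
          by_cases hpar : d % 2 = 0
          · rw [if_pos hpar]
            simp only [hpar]
            simpa using PySem.List.pairwise_lt_pyRange_one _ _
          · rw [if_neg hpar]
            rw [PySem.List.pyRange_neg_one_eq_reverse, List.pairwise_reverse]
            simp only [ne_eq, hpar, not_false_iff, if_true]
            have := PySem.List.pairwise_lt_pyRange_one (max 0 (d - n + 1) - 1 + 1) (min d (n - 1) + 1)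
            exact this.imp (by intro a b h; simp; omega)
        apply base.imp_of_mem
        intro a b ha hb h
        rw [hkey a ha, hkey b hb, Prod.Lex.toLex_lt_toLex]
        right; exact ⟨rfl, h⟩
      exact hy
  · -- across diagonals
    rw [List.pairwise_map]
    have := PySem.List.pairwise_lt_pyRange_one 0 (2 * n - 1)
    refine this.imp_of_mem ?_
    intro d d' hd hd' hlt a ha b hb
    simp only [List.mem_map] at ha hb
    obtain ⟨y, hy, rfl⟩ := ha
    obtain ⟨y', hy', rfl⟩ := hb
    simp only [zzKey, zigzagK1]
    rw [Prod.Lex.toLex_lt_toLex]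
    left
    simp only []
    omega

theorem zz_nodup_cells (n : Int) : (zzCells n).Nodup :=
  (zz_pairwise_cells n).imp (fun h heq => absurd (heq ▸ h) (lt_irrefl _))

theorem zz_cells_perm_pairs (n : Int) : (zzCells n).Perm (zzPairs n) :=
  (List.perm_ext_iff_of_nodup (zz_nodup_cells n) (zz_nodup_pairs n)).mpr
    (fun p => by rw [zz_mem_cells, zz_mem_pairs])

theorem zz_sorted_eq_cells (n : Int) :
    PySem.List.sorted2 (zzPairs n) zigzagK1 zigzagK2 = zzCells n := by
  rw [zz_sorted2_eq_sorted_lex]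
  exact PySem.List.sorted_eq_of_perm_of_pairwise_lt _ _ zzKey
    (zz_cells_perm_pairs n) (zz_pairwise_cells n)

-- ===== VERDICT (by name: the statement is the Claim_ definition above) =====
theorem zigzag_spec : Claim_equal_zigzag := by
  intro n _
  unfold Spec_zigzag
  rw [zz_a_shape, zz_alt_shape, zz_sorted_eq_cells]
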